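-- pv_equiv track=rewrite | github.com/gsi-upm/nerdy | pipeline/ner.py | _extract_chunks
-- ===== SOURCE A (Python) =====
-- def _extract_chunks(sequence):
--   chunks = []
--   entity = False
--   for i in range(len(sequence)):
--     if sequence[i] != 'O' and not entity:
--       start = i
--       entity = True
--     if sequence[i] == 'O' and entity:
--       end = i-1
--       chunks.append((start, end))
--       entity = False
--     if i == len(sequence)-1 and entity:
--       end = i
--       chunks.append((start, end))
--       entity = False
--   return chunks
-- ===== SOURCE B (Python) =====
-- def _extract_chunks(sequence):
--     chunks = []
--     i = 0
--     n = len(sequence)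
--     while i < n:
--         if sequence[i] == 'O':
--             i += 1
--         else:
--             j = i
--             while j + 1 < n and sequence[j + 1] != 'O':
--                 j += 1
--             chunks.append((i, j))
--             i = j + 1
--     return chunks
-- ===== Notes on version B (the rewrite author's own statement) =====
-- stated objective: alternative
-- what changed: Replaces A's per-index loop with an entity flag and a last-index special case by a two-pointer run scan: skip 'O' tags, extend j to the end of each non-'O' run, emit (i, j) and jump past the run.
import Mathlib
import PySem

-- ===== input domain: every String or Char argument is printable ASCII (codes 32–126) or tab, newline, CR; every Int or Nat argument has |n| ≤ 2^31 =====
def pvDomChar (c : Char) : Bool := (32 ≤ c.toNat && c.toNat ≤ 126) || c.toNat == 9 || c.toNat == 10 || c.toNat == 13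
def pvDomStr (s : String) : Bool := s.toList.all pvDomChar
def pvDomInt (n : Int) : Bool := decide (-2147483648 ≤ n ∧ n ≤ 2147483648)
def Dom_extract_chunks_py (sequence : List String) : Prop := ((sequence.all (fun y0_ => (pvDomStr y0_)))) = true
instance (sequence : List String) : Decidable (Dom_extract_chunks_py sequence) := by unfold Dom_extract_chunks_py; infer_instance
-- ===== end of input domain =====

-- B replaces A's entity flag and its end-of-sequence special case by a run-scanning
-- two-pointer loop (alternative decomposition, same cost).

-- ===== PORT A =====
-- transliteration of A's indexed for-loop with (chunks, entity, start) state
def pvStepA (sequence : List String) (n : Int)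
    (st : List (Int × Int) × Bool × Int) (i : Int) : List (Int × Int) × Bool × Int :=
  let chunks := st.1
  let entity := st.2.1
  let start := st.2.2
  let s := PySem.List.pyGetD sequence i ""
  let (entity, start) := if s ≠ "O" ∧ entity = false then (true, i) else (entity, start)
  let (chunks, entity) :=
    if s = "O" ∧ entity = true then (chunks ++ [(start, i - 1)], false) else (chunks, entity)
  let (chunks, entity) :=
    if i = n - 1 ∧ entity = true then (chunks ++ [(start, i)], false) else (chunks, entity)
  (chunks, entity, start)

def extract_chunks_py (sequence : List String) : List (Int × Int) :=
  let n : Int := sequence.length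
  ((PySem.List.pyRange 0 n 1).foldl (pvStepA sequence n) ([], false, 0)).1

-- ===== PORT B =====
-- Source B's outer while = recursion on the remaining suffix at absolute index i;
-- its inner `while j+1 < n and sequence[j+1] != 'O'` = the takeWhile run length on the tail
def pvScanB (i : Int) (l : List String) : List (Int × Int) :=
  match l with
  | [] => []
  | s :: rest =>
    if s = "O" then pvScanB (i + 1) rest
    else
      let k := (rest.takeWhile (fun t => t != "O")).length
      (i, i + k) :: pvScanB (i + k + 1) (rest.drop k)
termination_by l.length
decreasing_by all_goals simp [List.length_drop]

def extract_chunks_py_alt (sequence : List String) : List (Int × Int) :=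
  pvScanB 0 sequence

-- ===== PRECONDITION & SPEC =====
def Spec_extract_chunks_py (sequence : List String) (out : List (Int × Int)) : Prop := out = extract_chunks_py_alt sequence
instance (sequence : List String) (out : List (Int × Int)) : Decidable (Spec_extract_chunks_py sequence out) := by unfold Spec_extract_chunks_py; infer_instance

-- ===== CLAIM (what is proved, stated in full; the proofs are below) =====
def Claim_equal_extract_chunks_py : Prop := ∀ (sequence : List String), Dom_extract_chunks_py sequence → Spec_extract_chunks_py sequence (extract_chunks_py sequence)

-- ===== LEMMAS AND PROOFS =====

-- what A's loop produces from index i onward when it is inside an entity started at `start`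
def pvClose (start i : Int) (l : List String) : List (Int × Int) :=
  let k := (l.takeWhile (fun t => t != "O")).length
  (start, i + k - 1) :: pvScanB (i + k + 1) (l.drop (k + 1))

theorem pvStepA_eval (sequence : List String) (n i start : Int) (chunks : List (Int × Int))
    (entity : Bool) (s : String) (hs : PySem.List.pyGetD sequence i "" = s) :
    pvStepA sequence n (chunks, entity, start) i =
      if s = "O" then
        (if entity then (chunks ++ [(start, i - 1)], false, start) else (chunks, false, start))
      else
        if i = n - 1 then
          (chunks ++ [((if entity then start else i), i)], false, if entity then start else i)
        else (chunks, true, if entity then start else i) := by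
  simp only [pvStepA, hs]
  by_cases h1 : s = "O" <;> by_cases h2 : entity = true <;> by_cases h3 : i = n - 1 <;>
    simp [h1, h2, h3]

theorem pv_drop_takeWhile_len {α} (l : List α) (p : α → Bool) :
    l.drop (l.takeWhile p).length = l.dropWhile p := by
  induction l with
  | nil => simp
  | cons a l ih => by_cases h : p a <;> simp [h, ih]

theorem pvScanB_dropO (j : Int) (l : List String)
    (h : ∀ s, l.head? = some s → s = "O") :
    pvScanB j l = pvScanB (j + 1) (l.drop 1) := by
  cases l with
  | nil => simp [pvScanB]
  | cons s rest =>
    have hs : s = "O" := h s rfl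
    simp [pvScanB, hs]

theorem pvClose_cons (start i : Int) (s : String) (rest : List String) (hs : ¬ s = "O") :
    pvClose start i (s :: rest) = pvClose start (i + 1) rest := by
  have hsne : (s != "O") = true := by simp [hs]
  simp only [pvClose, List.takeWhile_cons, hsne, if_true, List.length_cons, List.drop_succ_cons]
  push_cast
  ring_nf

theorem pvA_loop (sequence : List String) (n : Int) (hn : n = (sequence.length : Int)) :
    ∀ (l : List String) (i : Int) (chunks : List (Int × Int)) (entity : Bool) (start : Int),
      0 ≤ i → i + l.length = n → sequence.drop i.toNat = l →
      (entity = true → l ≠ []) →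
      ((PySem.List.pyRange i n 1).foldl (pvStepA sequence n) (chunks, entity, start)).1 =
        chunks ++ (if entity then pvClose start i l else pvScanB i l) := by
  intro l
  induction l with
  | nil =>
    intro i chunks entity start hi hlen hdrop hent
    have hib : n ≤ i := by simp at hlen; omega
    rw [PySem.List.pyRange_one_eq_nil hib]
    cases entity with
    | false => simp [pvScanB]
    | true => exact absurd rfl (hent rfl)
  | cons s rest ih =>
    intro i chunks entity start hi hlen hdrop hent
    have hin : i < n := by simp at hlen; omega
    rw [PySem.List.pyRange_one_cons hin]
    simp only [List.foldl_cons]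
    have hexists : i.toNat < sequence.length := by
      have := congrArg List.length hdrop
      simp at this; omega
    have hget : sequence[i.toNat] = s := by
      have h0 : (sequence.drop i.toNat)[0]'(by rw [hdrop]; simp) = s := by simp [hdrop]
      simpa using h0
    have hgetD : PySem.List.pyGetD sequence i "" = s := by
      have h1 : i = ((i.toNat : Nat) : Int) := by omega
      rw [h1, PySem.List.pyGetD_natCast, List.getD_eq_getElem _ _ hexists, hget]
    have hdrop' : sequence.drop (i + 1).toNat = rest := by
      have h2 : (i + 1).toNat = i.toNat + 1 := by omega
      rw [h2, ← List.drop_drop, hdrop]; simp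
    rw [pvStepA_eval sequence n i start chunks entity s hgetD]
    by_cases hsO : s = "O"
    · rw [if_pos hsO]
      cases entity with
      | false =>
        rw [if_neg (by simp)]
        rw [ih (i + 1) chunks false start (by omega) (by have := hlen; simp at this; omega) hdrop' (by simp)]
        simp [pvScanB, hsO]
      | true =>
        rw [if_pos rfl]
        rw [ih (i + 1) (chunks ++ [(start, i - 1)]) false start (by omega)
            (by have := hlen; simp at this; omega) hdrop' (by simp)]
        rw [if_pos rfl]
        simp only [pvClose, List.takeWhile_cons, hsO]
        simp
    · rw [if_neg hsO]
      by_cases hlast : i = n - 1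
      · have hrest : rest = [] := by
          have : rest.length = 0 := by have := hlen; simp at this; omega
          simpa using this
        rw [if_pos hlast]
        rw [ih (i + 1) (chunks ++ [((if entity then start else i), i)]) false
            (if entity then start else i) (by omega) (by have := hlen; simp at this; omega) hdrop' (by simp)]
        cases entity with
        | false => simp [pvScanB, hsO, hrest]
        | true => simp [pvClose, hrest, hsO, pvScanB]
      · have hrest : rest ≠ [] := by
          intro h; subst h; simp at hlen; omega
        rw [if_neg hlast]
        cases entity with
        | true =>
          -- run continues: both sides close the same run one step later
          try simp only [reduceIte]
          rw [ih (i + 1) chunks true start (by omega)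
              (by have := hlen; simp at this; omega) hdrop' (fun _ => hrest)]
          try simp only [reduceIte]
          rw [pvClose_cons start i s rest hsO]
        | false =>
          -- entity just started at i: relate pvClose at i+1 with pvScanB's run at i
          rw [show (if false = true then start else i) = i from rfl,
              show (if false = true then pvClose start i (s :: rest) else pvScanB i (s :: rest))
                = pvScanB i (s :: rest) from rfl]
          rw [ih (i + 1) chunks true i (by omega)
              (by have := hlen; simp at this; omega) hdrop' (fun _ => hrest)]
          try simp only [reduceIte]
          simp only [pvScanB, if_neg hsO, pvClose]
          set k := (rest.takeWhile (fun t => t != "O")).length with hk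
          have hdropO : pvScanB (i + k + 1) (rest.drop k) = pvScanB (i + k + 2) (rest.drop (k + 1)) := by
            have harg : ∀ t, (rest.drop k).head? = some t → t = "O" := by
              intro t ht
              rw [hk, pv_drop_takeWhile_len] at ht
              have hne : rest.dropWhile (fun t => t != "O") ≠ [] := by
                intro hnil; rw [hnil] at ht; simp at ht
              have hO := List.head_dropWhile_not (fun t => t != "O") hne
              have h2 := List.head?_eq_some_head (l := rest.dropWhile (fun t => t != "O")) hne
              rw [h2] at ht
              have hth := Option.some.inj ht
              rw [hth] at hO
              simpa using hO
            have h := pvScanB_dropO (i + k + 1) (rest.drop k) harg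
            rw [List.drop_drop] at h
            have he : i + (k : Int) + 1 + 1 = i + k + 2 := by ring
            rw [he] at h
            exact h
          rw [hdropO]
          ring_nf

-- ===== VERDICT (by name: the statement is the Claim_ definition above) =====
theorem extract_chunks_py_spec : Claim_equal_extract_chunks_py := by
  intro sequence _
  unfold Spec_extract_chunks_py extract_chunks_py extract_chunks_py_alt
  rw [pvA_loop sequence (sequence.length : Int) rfl sequence 0 [] false 0 le_rfl (by simp)
      (by simp) (by simp)]
  simp
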